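-- pv_equiv track=rewrite | github.com/hscspring/pnlp | pnlp/pcut.py | combine_bucket
-- ===== SOURCE A (Python) =====
-- import itertools
--
-- def combine_bucket(
--         parts: list,
--         threshold: int,
--         truncate: bool = False,
--         keep_remain: bool = False) -> list:
--     """
--     Convert parts to buckets with given length(threshold).
--
--     Parameters
--     ----------
--     parts: the given parts.
--     threshold: bucket length.
--     truncate: whether to truncate those whose length is bigger than threshold.
--     keep_remain: when truncate=True, whether to keep the remain parts.
--
--     Returns
--     out: list of bucket.
--     -------
--     """
--     def deal_long_part(part: str) -> list:
--         result = []
--         if truncate: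
--             if keep_remain:
--                 len_subparts = len(part) // threshold + 1
--                 for i in range(len_subparts):
--                     sub_part = part[i*threshold: (i+1)*threshold]
--                     if sub_part:
--                         result.append(sub_part)
--             else:
--                 result.append(part[:threshold])
--         else:
--             result.append(part)
--         return result
--
--     buckets = []
--     while parts:
--         part = parts.pop(0)
--         # directly add to buckets when a part is longer than threshold
--         if len(part) > threshold:
--             sub_parts = deal_long_part(part)
--             buckets.append(sub_parts)
--         else:
--             while parts and len(part) < threshold:
--                 another = parts[0]
--                 if len(part + another) > threshold:
--                     break
--                 else:
--                     part += parts.pop(0)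
--             buckets.append([part])
--     result = list(itertools.chain(*buckets))
--     return result
-- ===== SOURCE B (Python) =====
-- def combine_bucket(
--         parts: list,
--         threshold: int,
--         truncate: bool = False,
--         keep_remain: bool = False) -> list:
--     """Single forward pass with a 'current bucket' accumulator instead of
--     destructive pop(0) loops plus list-of-lists + itertools.chain."""
--     def deal_long_part(part: str) -> list:
--         result = []
--         if truncate:
--             if keep_remain:
--                 len_subparts = len(part) // threshold + 1
--                 for i in range(len_subparts):
--                     sub_part = part[i*threshold: (i+1)*threshold]
--                     if sub_part:
--                         result.append(sub_part)
--             else: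
--                 result.append(part[:threshold])
--         else:
--             result.append(part)
--         return result
--
--     pending = list(parts)
--     parts.clear()  # A consumes its argument via pop(0); keep that side effect
--     out = []
--     cur = None
--     for p in pending:
--         if cur is not None:
--             if len(cur) < threshold and len(cur) + len(p) <= threshold:
--                 cur += p
--                 continue
--             out.append(cur)
--             cur = None
--         if len(p) > threshold:
--             out.extend(deal_long_part(p))
--         else:
--             cur = p
--     if cur is not None:
--         out.append(cur)
--     return out
-- ===== Notes on version B (the rewrite author's own statement) =====
-- stated objective: faster
-- what changed: Replaced A's destructive pop(0) outer loop with a nested absorption while and a list-of-lists flattened by itertools.chain by a single forward pass keeping a 'current bucket' accumulator that appends to the flat result directly (deal_long_part reused verbatim); parts is still emptied to keep A's in-place side effect.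
import Mathlib
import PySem

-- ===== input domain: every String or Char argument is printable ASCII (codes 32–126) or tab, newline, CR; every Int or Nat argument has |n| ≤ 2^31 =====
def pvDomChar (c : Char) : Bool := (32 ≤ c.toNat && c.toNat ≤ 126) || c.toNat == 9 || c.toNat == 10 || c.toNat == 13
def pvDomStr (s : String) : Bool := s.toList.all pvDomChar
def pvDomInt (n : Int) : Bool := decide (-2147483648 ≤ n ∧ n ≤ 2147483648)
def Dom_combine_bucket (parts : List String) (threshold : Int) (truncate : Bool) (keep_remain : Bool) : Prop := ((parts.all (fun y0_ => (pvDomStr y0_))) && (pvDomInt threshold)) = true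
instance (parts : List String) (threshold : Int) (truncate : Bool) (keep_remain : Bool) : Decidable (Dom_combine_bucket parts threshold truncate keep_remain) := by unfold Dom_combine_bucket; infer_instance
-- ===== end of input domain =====

-- B rewrites A's destructive pop(0)/inner-while/list-of-lists+chain scheme as one forward
-- pass with a 'current bucket' accumulator producing the flat result directly (objective:
-- alternative decomposition).  A empties `parts` in place via pop(0); B performs the same
-- mutation with parts.clear(); the theorems here are about the RETURN value.

-- ===== PORT A =====
-- strings are handled as List Char (PySem.Chars side); each port wraps with toList/ofList

-- deal_long_part (closure over threshold/truncate/keep_remain)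
def pvDealLongA (threshold : Int) (truncate keep_remain : Bool) (part : List Char) : List (List Char) :=
  if truncate then
    if keep_remain then
      -- len_subparts = len(part) // threshold + 1  (Python floor division)
      let len_subparts := PySem.Int.floordiv (part.length : Int) threshold + 1
      (PySem.List.pyRange 0 len_subparts 1).foldl
        (fun result i =>
          let sub_part := PySem.List.slice part (some (i * threshold)) (some ((i + 1) * threshold))
          if sub_part ≠ [] then result ++ [sub_part] else result) []
    else [PySem.List.slice part none (some threshold)]
  else [part]

-- the inner `while parts and len(part) < threshold: …` absorption loop; returns the grown
-- part and the remaining (not yet popped) parts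
def pvAbsorbA (threshold : Int) : List Char → List (List Char) → List Char × List (List Char)
  | part, [] => (part, [])
  | part, another :: rest =>
    if (part.length : Int) < threshold then
      if ((part ++ another).length : Int) > threshold then (part, another :: rest)
      else pvAbsorbA threshold (part ++ another) rest
    else (part, another :: rest)

theorem pvAbsorbA_len (threshold : Int) (part : List Char) (l : List (List Char)) :
    (pvAbsorbA threshold part l).2.length ≤ l.length := by
  induction l generalizing part with
  | nil => simp [pvAbsorbA]
  | cons a rest ih =>
    simp only [pvAbsorbA]
    split_ifs with h1 h2
    · simp
    · exact le_trans (ih _) (by simp)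
    · simp

-- the outer `while parts:` loop, building buckets (a list of lists)
def pvLoopA (threshold : Int) (truncate keep_remain : Bool) : List (List Char) → List (List (List Char))
  | [] => []
  | part :: rest =>
    if (part.length : Int) > threshold then
      pvDealLongA threshold truncate keep_remain part :: pvLoopA threshold truncate keep_remain rest
    else
      let pr := pvAbsorbA threshold part rest
      [pr.1] :: pvLoopA threshold truncate keep_remain pr.2
termination_by l => l.length
decreasing_by
  · simp
  · exact Nat.lt_succ_of_le (pvAbsorbA_len threshold part rest)

def combine_bucket (parts : List String) (threshold : Int) (truncate : Bool) (keep_remain : Bool) : List String :=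
  ((pvLoopA threshold truncate keep_remain (parts.map (·.toList))).flatten).map
    (fun cs => String.ofList cs)

-- ===== PORT B =====
-- deal_long_part is reused verbatim in Source B; its port is the same body
def pvDealLongB (threshold : Int) (truncate keep_remain : Bool) (part : List Char) : List (List Char) :=
  if truncate then
    if keep_remain then
      let len_subparts := PySem.Int.floordiv (part.length : Int) threshold + 1
      (PySem.List.pyRange 0 len_subparts 1).foldl
        (fun result i =>
          let sub_part := PySem.List.slice part (some (i * threshold)) (some ((i + 1) * threshold))
          if sub_part ≠ [] then result ++ [sub_part] else result) []
    else [PySem.List.slice part none (some threshold)]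
  else [part]

-- handle a part when no bucket is open (the tail of B's loop body)
def pvOpenB (threshold : Int) (truncate keep_remain : Bool)
    (out : List (List Char)) (p : List Char) : List (List Char) × Option (List Char) :=
  if (p.length : Int) > threshold then (out ++ pvDealLongB threshold truncate keep_remain p, none)
  else (out, some p)

-- one iteration of B's for-loop: state = (out, cur)
def pvStepB (threshold : Int) (truncate keep_remain : Bool)
    (st : List (List Char) × Option (List Char)) (p : List Char) : List (List Char) × Option (List Char) :=
  match st.2 with
  | some cur =>
    if (cur.length : Int) < threshold ∧ (cur.length : Int) + (p.length : Int) ≤ threshold then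
      (st.1, some (cur ++ p))
    else pvOpenB threshold truncate keep_remain (st.1 ++ [cur]) p
  | none => pvOpenB threshold truncate keep_remain st.1 p

-- final flush of cur
def pvFinishB (st : List (List Char) × Option (List Char)) : List (List Char) :=
  match st.2 with
  | some cur => st.1 ++ [cur]
  | none => st.1

def combine_bucket_alt (parts : List String) (threshold : Int) (truncate : Bool) (keep_remain : Bool) : List String :=
  (pvFinishB ((parts.map (·.toList)).foldl (pvStepB threshold truncate keep_remain) ([], none))).map
    (fun cs => String.ofList cs)

-- ===== PRECONDITION & SPEC =====
-- Pre_ excludes exactly the inputs where Python A raises ZeroDivisionError: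
-- threshold = 0 with truncate and keep_remain and some non-empty part.
def Pre_combine_bucket (parts : List String) (threshold : Int) (truncate : Bool) (keep_remain : Bool) : Prop :=
  ¬ (threshold = 0 ∧ truncate = true ∧ keep_remain = true ∧ ∃ p ∈ parts, p.toList ≠ [])
instance (parts : List String) (threshold : Int) (truncate : Bool) (keep_remain : Bool) : Decidable (Pre_combine_bucket parts threshold truncate keep_remain) := by unfold Pre_combine_bucket; infer_instance

def pvWitness_combine_bucket : List String × Int × Bool × Bool := (["ab", "c", "defg"], 3, true, true)

def Spec_combine_bucket (parts : List String) (threshold : Int) (truncate : Bool) (keep_remain : Bool) (out : List String) : Prop := out = combine_bucket_alt parts threshold truncate keep_remain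
instance (parts : List String) (threshold : Int) (truncate : Bool) (keep_remain : Bool) (out : List String) : Decidable (Spec_combine_bucket parts threshold truncate keep_remain out) := by unfold Spec_combine_bucket; infer_instance

-- ===== CLAIM (what is proved, stated in full; the proofs are below) =====
def Claim_equal_combine_bucket : Prop := ∀ (parts : List String) (threshold : Int) (truncate : Bool) (keep_remain : Bool), Dom_combine_bucket parts threshold truncate keep_remain → Pre_combine_bucket parts threshold truncate keep_remain → Spec_combine_bucket parts threshold truncate keep_remain (combine_bucket parts threshold truncate keep_remain)

-- ===== LEMMAS AND PROOFS =====

theorem pvDealLong_eq : pvDealLongB = pvDealLongA := rfl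

-- what A produces after the point where B's state is (·, cur?)
def pvSpecAfter (threshold : Int) (truncate keep_remain : Bool) :
    Option (List Char) → List (List Char) → List (List Char)
  | none, ps => (pvLoopA threshold truncate keep_remain ps).flatten
  | some cur, ps =>
    let pr := pvAbsorbA threshold cur ps
    pr.1 :: (pvLoopA threshold truncate keep_remain pr.2).flatten

theorem pvMain (threshold : Int) (truncate keep_remain : Bool)
    (ps : List (List Char)) :
    ∀ (out : List (List Char)) (cur? : Option (List Char)),
      pvFinishB (ps.foldl (pvStepB threshold truncate keep_remain) (out, cur?)) =
        out ++ pvSpecAfter threshold truncate keep_remain cur? ps := by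
  induction ps with
  | nil =>
    intro out cur?
    cases cur? with
    | none => simp [pvFinishB, pvSpecAfter, pvLoopA]
    | some cur => simp [pvFinishB, pvSpecAfter, pvAbsorbA, pvLoopA]
  | cons p rest ih =>
    intro out cur?
    cases cur? with
    | none =>
      simp only [List.foldl_cons, pvStepB, pvOpenB]
      split_ifs with h
      · rw [ih]
        simp [pvSpecAfter, pvLoopA, h, pvDealLong_eq]
      · rw [ih]
        simp only [pvSpecAfter, pvLoopA, if_neg h, List.flatten_cons]
        simp
    | some cur =>
      simp only [List.foldl_cons, pvStepB]
      split_ifs with habs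
      · rw [ih]
        have : pvAbsorbA threshold cur (p :: rest) = pvAbsorbA threshold (cur ++ p) rest := by
          simp only [pvAbsorbA, List.length_append]
          rw [if_pos habs.1, if_neg (by push_cast; omega)]
        simp [pvSpecAfter, this]
      · have hstop : pvAbsorbA threshold cur (p :: rest) = (cur, p :: rest) := by
          simp only [pvAbsorbA, List.length_append]
          by_cases h1 : (cur.length : Int) < threshold
          · rw [if_pos h1, if_pos (by push_cast at habs ⊢; omega)]
          · rw [if_neg h1]
        simp only [pvOpenB]
        split_ifs with hlong
        · rw [ih]
          simp only [pvSpecAfter, hstop, pvLoopA, if_pos hlong, List.flatten_cons]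
          simp [pvDealLong_eq]
        · rw [ih]
          simp only [pvSpecAfter, hstop, pvLoopA, if_neg hlong, List.flatten_cons]
          simp

-- ===== VERDICT (by name: the statement is the Claim_ definition above) =====
theorem combine_bucket_spec : Claim_equal_combine_bucket := by
  intro parts threshold truncate keep_remain _ _
  unfold Spec_combine_bucket combine_bucket combine_bucket_alt
  rw [pvMain threshold truncate keep_remain (parts.map (·.toList)) [] none]
  simp [pvSpecAfter]
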